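-- pv_equiv track=rewrite | github.com/isoldaliborio/challenge_100daysofcode | Python/17_challenge_.py | solution
-- ===== SOURCE A (Python) =====
-- def solution(a):
--     n = len(a)
--     b = [0 for x in range(n)]
--     for i in range(n):
--         b[i]=a[i]
--         if i > 0:
--              b[i]+=  a[i-1]
--         if i < n-1:
--             b[i] += a[i+1]
--     return b
-- ===== SOURCE B (Python) =====
-- def solution(a):
--     n = len(a)
--     p = [0]
--     s = 0
--     for x in a:
--         s += x
--         p.append(s)
--     return [p[min(i + 2, n)] - p[max(i - 1, 0)] for i in range(n)]
-- ===== Notes on version B (the rewrite author's own statement) =====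
-- stated objective: alternative
-- what changed: Replaces per-index neighbor inspection with boundary guards by a prefix-sum table built in one pass, each output being a difference of two clamped prefix sums.
import Mathlib
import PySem

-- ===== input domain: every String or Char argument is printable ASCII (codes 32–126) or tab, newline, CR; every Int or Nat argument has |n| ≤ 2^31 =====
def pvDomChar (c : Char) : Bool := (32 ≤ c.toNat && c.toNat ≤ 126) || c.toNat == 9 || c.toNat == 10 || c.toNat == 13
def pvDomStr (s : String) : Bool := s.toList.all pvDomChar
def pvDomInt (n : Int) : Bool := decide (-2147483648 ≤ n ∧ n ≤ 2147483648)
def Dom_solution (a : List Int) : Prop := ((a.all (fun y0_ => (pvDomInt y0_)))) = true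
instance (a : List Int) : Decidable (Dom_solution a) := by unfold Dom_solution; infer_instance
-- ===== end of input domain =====

-- B builds a prefix-sum table and returns clamped prefix-sum differences instead of A's
-- per-index neighbor reads with boundary guards; same O(n) cost, alternative decomposition.

-- ===== PORT A =====
def solution (a : List Int) : List Int :=
  let n : Int := a.length
  let b : List Int := (PySem.List.pyRange 0 n 1).map (fun _ => (0 : Int))
  (PySem.List.pyRange 0 n 1).foldl (fun b i =>
    let v := PySem.List.pyGetD a i 0
    let v := if i > 0 then v + PySem.List.pyGetD a (i - 1) 0 else v
    let v := if i < n - 1 then v + PySem.List.pyGetD a (i + 1) 0 else v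
    b.set i.toNat v) b

-- ===== PORT B =====
def solution_alt (a : List Int) : List Int :=
  let n : Int := a.length
  let ps := a.foldl (fun (ps : List Int × Int) x => (ps.1 ++ [ps.2 + x], ps.2 + x)) ([0], 0)
  let p := ps.1
  (PySem.List.pyRange 0 n 1).map (fun i =>
    PySem.List.pyGetD p (min (i + 2) n) 0 - PySem.List.pyGetD p (max (i - 1) 0) 0)

-- ===== PRECONDITION & SPEC =====
def Spec_solution (a : List Int) (out : List Int) : Prop := out = solution_alt a
instance (a : List Int) (out : List Int) : Decidable (Spec_solution a out) := by unfold Spec_solution; infer_instance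

-- ===== CLAIM (what is proved, stated in full; the proofs are below) =====
def Claim_equal_solution : Prop := ∀ (a : List Int), Dom_solution a → Spec_solution a (solution a)

-- ===== LEMMAS AND PROOFS =====

-- the value A stores at index k (as a function of the input only)
def aVal (a : List Int) (k : Nat) : Int :=
  a.getD k 0 + (if 0 < k then a.getD (k - 1) 0 else 0)
    + (if k + 1 < a.length then a.getD (k + 1) 0 else 0)

-- A's loop body at index ↑k is a plain `set k (aVal a k)`
lemma bodyA (a : List Int) (k : Nat) (hk : k < a.length) (b : List Int) :
    (let v := PySem.List.pyGetD a (↑k) 0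
     let v := if ((k : Int)) > 0 then v + PySem.List.pyGetD a ((k : Int) - 1) 0 else v
     let v := if ((k : Int)) < (a.length : Int) - 1 then v + PySem.List.pyGetD a ((k : Int) + 1) 0 else v
     b.set ((k : Int)).toNat v) = b.set k (aVal a k) := by
  dsimp only
  rw [Int.toNat_natCast]
  have hplus : PySem.List.pyGetD a ((k : Int) + 1) 0 = a.getD (k + 1) 0 := by
    rw [show ((k : Int) + 1) = ((k + 1 : Nat) : Int) from by push_cast; ring,
      PySem.List.pyGetD_natCast]
  unfold aVal
  by_cases h1 : 0 < k <;> by_cases h2 : k + 1 < a.length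
  · rw [if_pos (show (k : Int) > 0 from by exact_mod_cast h1),
      if_pos (show (k : Int) < (a.length : Int) - 1 from by omega),
      if_pos h1, if_pos h2, hplus,
      show ((k : Int) - 1) = ((k - 1 : Nat) : Int) from by omega]
    simp [PySem.List.pyGetD_natCast]
  · rw [if_pos (show (k : Int) > 0 from by exact_mod_cast h1),
      if_neg (show ¬ (k : Int) < (a.length : Int) - 1 from by omega),
      if_pos h1, if_neg h2,
      show ((k : Int) - 1) = ((k - 1 : Nat) : Int) from by omega]
    simp [PySem.List.pyGetD_natCast]
  · rw [if_neg (show ¬ (k : Int) > 0 from by omega),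
      if_pos (show (k : Int) < (a.length : Int) - 1 from by omega),
      if_neg h1, if_pos h2, hplus]
    simp [PySem.List.pyGetD_natCast]
  · rw [if_neg (show ¬ (k : Int) > 0 from by omega),
      if_neg (show ¬ (k : Int) < (a.length : Int) - 1 from by omega),
      if_neg h1, if_neg h2]
    simp [PySem.List.pyGetD_natCast]

-- setting all indices of `range m` in order writes a map over the prefix
lemma setfold (f : Nat → Int) : ∀ (m : Nat) (b : List Int), m ≤ b.length →
    (List.range m).foldl (fun b k => b.set k (f k)) b = (List.range m).map f ++ b.drop m := by
  intro m
  induction m with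
  | zero => intro b _; simp
  | succ m ih =>
    intro b hb
    have hm : m < b.length := by omega
    rw [List.range_succ, List.foldl_append, ih b (by omega)]
    simp only [List.foldl_cons, List.foldl_nil, List.set_append, List.length_map,
      List.length_range, lt_irrefl, Nat.sub_self]
    rw [show List.drop m b = b[m] :: List.drop (m + 1) b from (List.getElem_cons_drop hm).symm,
      List.set_cons_zero]
    simp

-- the prefix-sum accumulator of B, characterised
lemma pref_spec : ∀ (xs : List Int) (l : List Int) (s : Int),
    xs.foldl (fun (ps : List Int × Int) x => (ps.1 ++ [ps.2 + x], ps.2 + x)) (l, s)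
      = (l ++ (List.range xs.length).map (fun k => s + (xs.take (k + 1)).sum), s + xs.sum) := by
  intro xs
  induction xs with
  | nil => intro l s; simp
  | cons x xs ih =>
    intro x_1 s
    simp only [List.foldl_cons]
    rw [ih (x_1 ++ [s + x]) (s + x)]
    refine Prod.ext ?_ (by simp [add_assoc])
    simp only [List.length_cons, List.range_succ_eq_map, List.map_cons, List.map_map,
      List.take_succ_cons, List.sum_cons, List.take_zero, List.sum_nil, add_zero,
      List.append_assoc, List.singleton_append]
    congr 2
    refine List.map_congr_left fun j hj => ?_
    simp [Function.comp, add_assoc]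

-- lookup into B's prefix-sum table
lemma pgetD (a : List Int) (j : Nat) (hj : j ≤ a.length) :
    (((0 : Int) :: (List.range a.length).map (fun k => 0 + (a.take (k + 1)).sum)).getD j 0)
      = (a.take j).sum := by
  cases j with
  | zero => simp
  | succ j' =>
    have hj' : j' < a.length := by omega
    rw [List.getD_cons_succ, PySem.List.getD_map_range _ _ _ _ hj']
    simp

-- pointwise agreement of the two formulas
lemma pointwise (a : List Int) (k : Nat) (hk : k < a.length) :
    (a.take (min (k + 2) a.length)).sum - (a.take (k - 1)).sum = aVal a k := by
  unfold aVal
  by_cases h1 : 0 < k <;> by_cases h2 : k + 1 < a.length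
  · have hmin : min (k + 2) a.length = k + 1 + 1 := by omega
    have e2 := List.sum_take_succ a (k + 1) h2
    have e1 := List.sum_take_succ a k hk
    have e0 := List.sum_take_succ a (k - 1) (by omega)
    rw [show k - 1 + 1 = k from by omega] at e0
    rw [hmin, if_pos h1, if_pos h2,
      List.getD_eq_getElem a 0 hk, List.getD_eq_getElem a 0 (show k - 1 < a.length from by omega),
      List.getD_eq_getElem a 0 h2]
    omega
  · have hmin : min (k + 2) a.length = k + 1 := by omega
    have e1 := List.sum_take_succ a k hk
    have e0 := List.sum_take_succ a (k - 1) (by omega)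
    rw [show k - 1 + 1 = k from by omega] at e0
    rw [hmin, if_pos h1, if_neg h2,
      List.getD_eq_getElem a 0 hk, List.getD_eq_getElem a 0 (show k - 1 < a.length from by omega)]
    omega
  · have hk0 : k = 0 := by omega
    subst hk0
    have hmin : min (0 + 2) a.length = 0 + 1 + 1 := by omega
    have e2 := List.sum_take_succ a 1 h2
    have e1 := List.sum_take_succ a 0 hk
    rw [hmin, if_neg h1, if_pos h2, List.getD_eq_getElem a 0 hk, List.getD_eq_getElem a 0 h2]
    simp at e1 e2 ⊢
    omega
  · have hk0 : k = 0 := by omega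
    subst hk0
    have hmin : min (0 + 2) a.length = 0 + 1 := by omega
    have e1 := List.sum_take_succ a 0 hk
    rw [hmin, if_neg h1, if_neg h2, List.getD_eq_getElem a 0 hk]
    simp at e1 ⊢
    omega

theorem main_eq (a : List Int) : solution a = solution_alt a := by
  unfold solution solution_alt
  rw [pref_spec a [0] 0]
  simp only [PySem.List.pyRange_zero_natCast, List.foldl_map, List.map_map]
  rw [PySem.List.foldl_congr_mem (List.range a.length) _ (fun b k => b.set k (aVal a k)) _
      (fun acc k hkmem => bodyA a k (List.mem_range.mp hkmem) acc)]
  rw [setfold (aVal a) a.length _ (by simp)]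
  rw [List.drop_eq_nil_of_le (by simp), List.append_nil]
  refine List.map_congr_left fun k hk => ?_
  have hk' : k < a.length := List.mem_range.mp hk
  have hmin : min (((k : Nat) : Int) + 2) ((a.length : Nat) : Int)
      = ((min (k + 2) a.length : Nat) : Int) := by omega
  have hmax : max (((k : Nat) : Int) - 1) 0 = ((k - 1 : Nat) : Int) := by omega
  simp only [Function.comp_apply, hmin, hmax, List.singleton_append, PySem.List.pyGetD_natCast]
  rw [pgetD a (min (k + 2) a.length) (by omega), pgetD a (k - 1) (by omega)]
  exact (pointwise a k hk').symm

-- ===== VERDICT (by name: the statement is the Claim_ definition above) =====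
theorem solution_spec : Claim_equal_solution := by
  intro a _
  exact main_eq a
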